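-- pv_equiv track=rewrite | github.com/euphwes/advent-of-code | 2025/day_6.py | _parse_columns_v2
-- ===== SOURCE A (Python) =====
-- def _parse_columns_v2(raw_input: list[str]) -> list[tuple[str, list[int]]]:
--     # Prepopulate a list of lists, where each inner list represents a column
--     # in the problem input.
--     columns: list[list[int]] = [[] for _ in range(len(raw_input[0].split()))]
--
--     # Hold which column we're currently parsing.
--     col_ix = 0
--
--     # Each line of the input is exactly the same length.
--     for i in range(len(raw_input[0])):
--         # If this column of single characters in the input is entirely comprised
--         # of spaces, it's the divider in between logical columns of numbers.
--         # The next set of characters will belong to the next logical column.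
--         if all(line[i] == " " for line in raw_input[:-1]):
--             col_ix += 1
--             continue
--
--         # The number (in cephalapod) is read from top to bottom.
--         # Iterate over every character at this index in every line,
--         # building up a list of digits, and then convert to an int.
--         number = int("".join([line[i] for line in raw_input[:-1]]))
--
--         # Add that number to the values that appear in this column.
--         columns[col_ix].append(number)
--
--     return [
--         (operator, columns[i])
--         # The final line is a sequence of operators (either * or +).
--         for i, operator in enumerate(raw_input[-1].split())
--     ]
-- ===== SOURCE B (Python) =====
-- def _split_groups(verticals):
--     # Recursively build the logical columns back-to-front: one fresh group per
--     # divider vertical, numbers prepended to the group under construction.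
--     if not verticals:
--         return [[]]
--     head, rest = verticals[0], verticals[1:]
--     groups = _split_groups(rest)
--     if head.strip(" ") == "":
--         return [[]] + groups
--     return [[int(head)] + groups[0]] + groups[1:]
--
--
-- def _parse_columns_v2(raw_input: list[str]) -> list[tuple[str, list[int]]]:
--     # Transpose the data lines into vertical strings once, then split that list
--     # of verticals into logical columns by structural recursion (back-to-front),
--     # instead of A's imperative index pass over pre-sized buckets.
--     data = raw_input[:-1]
--     verticals = ["".join(line[i] for line in data) for i in range(len(raw_input[0]))]
--     groups = _split_groups(verticals)
--     return [(op, groups[i]) for i, op in enumerate(raw_input[-1].split())]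
-- ===== Notes on version B (the rewrite author's own statement) =====
-- stated objective: alternative
-- what changed: B transposes the data lines into vertical strings and splits that list into logical columns by structural recursion built back-to-front (a fresh group per divider, numbers prepended to the group under construction), instead of A's imperative index pass that appends into pre-allocated per-token buckets through a running column counter; Pre_ additionally excludes inputs whose operator line has more tokens than divider-delimited groups (there A pairs the extra operators with leftover empty buckets sized from the first line, which is accidental, and B raises IndexError).
-- outside the precondition, e.g. on _parse_columns_v2(['1 2', '333', '+ *']): A returns [('+', [13, 3, 23]), ('*', [])], B raises IndexError
import Mathlib
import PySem

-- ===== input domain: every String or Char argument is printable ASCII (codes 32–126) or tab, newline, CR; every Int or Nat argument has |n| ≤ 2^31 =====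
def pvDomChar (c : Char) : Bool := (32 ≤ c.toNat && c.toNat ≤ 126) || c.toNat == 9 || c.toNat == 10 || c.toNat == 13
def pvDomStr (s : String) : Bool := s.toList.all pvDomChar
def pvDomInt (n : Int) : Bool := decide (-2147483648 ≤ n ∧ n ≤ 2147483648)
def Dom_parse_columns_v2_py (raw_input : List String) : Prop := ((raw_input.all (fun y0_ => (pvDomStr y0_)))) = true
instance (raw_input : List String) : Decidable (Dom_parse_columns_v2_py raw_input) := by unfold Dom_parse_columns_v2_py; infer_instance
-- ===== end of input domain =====

-- B replaces A's imperative index pass over pre-allocated buckets by a structural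
-- recursion that splits the transposed verticals into groups back-to-front.

-- ===== PORT A =====
-- literal transliteration of _parse_columns_v2: pre-sized `columns`, a `col_ix`
-- counter bumped on all-space character columns, in-place append via List.set.
def parse_columns_v2_py (raw_input : List String) : List (String × List Int) :=
  let line0 := (PySem.List.pyGet? raw_input 0).getD ""
  let columns : List (List Int) :=
    (List.range (PySem.Str.split₀ line0).length).map (fun _ => ([] : List Int))
  let data := PySem.List.slice raw_input none (some (-1))
  let st := (List.range line0.toList.length).foldl
    (fun (st : List (List Int) × Nat) (i : Nat) =>
      if data.all (fun line => ((PySem.Str.pyGet? line (i : Int)).getD ' ') == ' ') then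
        (st.1, st.2 + 1)
      else
        let number :=
          (PySem.Int.ofChars? (data.map (fun line => (PySem.Str.pyGet? line (i : Int)).getD ' '))).getD 0
        (st.1.set st.2 ((st.1.getD st.2 []) ++ [number]), st.2))
    (columns, 0)
  (PySem.List.enumerate (PySem.Str.split₀ ((PySem.List.pyGet? raw_input (-1)).getD ""))).map
    (fun p => (p.2, (PySem.List.pyGet? st.1 p.1).getD []))

-- ===== PORT B =====
-- literal transliteration of Source B's _split_groups: recursion on the vertical list,
-- groups built back-to-front; `groups[0]` is ported with a default (the recursion
-- always returns a non-empty list, so Python's groups[0] never raises).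
def pvSplitGroups : List (List Char) → List (List Int)
  | [] => [[]]
  | v :: vs =>
    let groups := pvSplitGroups vs
    if PySem.Chars.stripChars v [' '] == [] then [] :: groups
    else (((PySem.Int.ofChars? v).getD 0) :: ((PySem.List.pyGet? groups 0).getD [])) ::
      PySem.List.slice groups (some 1) none

-- literal transliteration of Source B's _parse_columns_v2: transpose once, recursive split.
def parse_columns_v2_py_alt (raw_input : List String) : List (String × List Int) :=
  let data := PySem.List.slice raw_input none (some (-1))
  let verticals := (List.range ((PySem.List.pyGet? raw_input 0).getD "").toList.length).map
    (fun (i : Nat) => data.map (fun line => (PySem.Str.pyGet? line (i : Int)).getD ' '))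
  let groups := pvSplitGroups verticals
  (PySem.List.enumerate (PySem.Str.split₀ ((PySem.List.pyGet? raw_input (-1)).getD ""))).map
    (fun p => (p.2, (PySem.List.pyGet? groups p.1).getD []))

-- ===== PRECONDITION & SPEC =====
-- the vertical character column at index i, read over the data lines raw_input[:-1]
def pvVert (data : List String) (i : Nat) : List Char :=
  data.map (fun l => l.toList.getD i ' ')

-- the vertical at index i is an all-space divider column
def pvIsDiv (data : List String) (i : Nat) : Bool :=
  (pvVert data i).all (fun c => c == ' ')

-- Pre_ excludes the inputs where A raises (empty list; a data line shorter than the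
-- first; a non-divider vertical that is not a valid int literal or whose bucket index
-- reaches the first line's token count; more operators than first-line tokens), and —
-- the one excluded region where A still RETURNS — inputs whose operator line has more
-- tokens than divider-delimited groups: there A pairs the extra operators with leftover
-- empty buckets sized from the first line, an accident of A's pre-allocation, and B
-- raises IndexError.
def Pre_parse_columns_v2_py (raw_input : List String) : Prop :=
  raw_input ≠ [] ∧
  (∀ l ∈ raw_input.dropLast, (raw_input.headD "").toList.length ≤ l.toList.length) ∧
  (∀ i < (raw_input.headD "").toList.length,
      pvIsDiv raw_input.dropLast i = true ∨
      ((PySem.Int.ofChars? (pvVert raw_input.dropLast i)).isSome = true ∧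
       (List.range i).countP (pvIsDiv raw_input.dropLast) <
         (PySem.Str.split₀ (raw_input.headD "")).length)) ∧
  (PySem.Str.split₀ (raw_input.getLast?.getD "")).length ≤
      (PySem.Str.split₀ (raw_input.headD "")).length ∧
  (PySem.Str.split₀ (raw_input.getLast?.getD "")).length ≤
      (List.range (raw_input.headD "").toList.length).countP (pvIsDiv raw_input.dropLast) + 1

instance (raw_input : List String) : Decidable (Pre_parse_columns_v2_py raw_input) := by
  unfold Pre_parse_columns_v2_py; infer_instance

def pvWitness_parse_columns_v2_py : List String := ["1 23", "4 56", "* +"]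

def Spec_parse_columns_v2_py (raw_input : List String) (out : List (String × List Int)) : Prop :=
  out = parse_columns_v2_py_alt raw_input

instance (raw_input : List String) (out : List (String × List Int)) :
    Decidable (Spec_parse_columns_v2_py raw_input out) := by
  unfold Spec_parse_columns_v2_py; infer_instance

-- ===== CLAIM (what is proved, stated in full; the proofs are below) =====
def Claim_equal_parse_columns_v2_py : Prop :=
  ∀ (raw_input : List String), Dom_parse_columns_v2_py raw_input →
    Pre_parse_columns_v2_py raw_input →
    Spec_parse_columns_v2_py raw_input (parse_columns_v2_py raw_input)

-- ===== LEMMAS AND PROOFS =====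

-- the number a vertical denotes (0 when int() would raise; Pre_ rules that out)
def pvNum (v : List Char) : Int := (PySem.Int.ofChars? v).getD 0

-- the finished/current grouping step over a vertical, used to characterise A's loop
def pvStepV (st : List (List Int) × List Int) (v : List Char) :
    List (List Int) × List Int :=
  if v.all (fun c => c == ' ') then (st.1 ++ [st.2], [])
  else (st.1, st.2 ++ [pvNum v])

-- A's loop body, with the character access normalised to pvVert
def pvStepA (data : List String) (st : List (List Int) × Nat) (i : Nat) :
    List (List Int) × Nat :=
  if pvIsDiv data i then (st.1, st.2 + 1)
  else (st.1.set st.2 ((st.1.getD st.2 []) ++ [pvNum (pvVert data i)]), st.2)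

-- pad/truncate a group list to exactly T entries, missing entries empty
def pvPad (T : Nat) (xs : List (List Int)) : List (List Int) :=
  xs.take T ++ List.replicate (T - xs.length) []

theorem pvPad_snoc_nil (T : Nat) (ys : List (List Int)) :
    pvPad T (ys ++ [[]]) = pvPad T ys := by
  unfold pvPad
  rcases le_or_gt T ys.length with h | h
  · rw [List.take_append_of_le_length h]
    have h1 : T - (ys.length + 1) = 0 := by omega
    have h2 : T - ys.length = 0 := by omega
    simp [h1, h2]
  · rw [List.take_of_length_le (by simp; omega), List.take_of_length_le (le_of_lt h)]
    have h1 : T - (ys ++ [([] : List Int)]).length + 1 = T - ys.length := by simp; omega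
    simp [List.append_assoc, ← h1, List.replicate_succ]

theorem pvPad_of_lt (T : Nat) (fin : List (List Int)) (cur : List Int)
    (h : fin.length < T) :
    pvPad T (fin ++ [cur]) = fin ++ cur :: List.replicate (T - fin.length - 1) [] := by
  unfold pvPad
  rw [List.take_of_length_le (by simp; omega)]
  simp [List.append_assoc, Nat.sub_sub]

theorem pvSet_append (fin : List (List Int)) (c v : List Int) (rest : List (List Int)) :
    (fin ++ c :: rest).set fin.length v = fin ++ v :: rest := by
  induction fin with
  | nil => simp
  | cons x xs ih => simp [ih]

theorem pvGetD_append (fin : List (List Int)) (c : List Int) (rest : List (List Int)) :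
    (fin ++ c :: rest).getD fin.length [] = c := by
  induction fin with
  | nil => simp
  | cons x xs ih => simp

theorem pvPad_getElem? (T k : Nat) (xs : List (List Int)) (hk : k < T) (hx : k < xs.length) :
    (pvPad T xs)[k]? = xs[k]? := by
  unfold pvPad
  rw [List.getElem?_append_left (by simp [List.length_take]; omega)]
  rw [List.getElem?_take_of_lt hk]

-- the loop invariant: A's fold state is the finished/current grouping padded to
-- T buckets, and A's column index is the number of dividers seen, which is the
-- finished-group count
theorem pvInv (data : List String) (T n : Nat)
    (H : ∀ i, i < n → pvIsDiv data i = true ∨ (List.range i).countP (pvIsDiv data) < T) :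
    (List.range n).foldl (pvStepA data) (List.replicate T [], 0) =
      (pvPad T (((List.range n).foldl (fun st i => pvStepV st (pvVert data i)) ([], [])).1 ++
                [((List.range n).foldl (fun st i => pvStepV st (pvVert data i)) ([], [])).2]),
       (List.range n).countP (pvIsDiv data)) ∧
    (((List.range n).foldl (fun st i => pvStepV st (pvVert data i)) ([], [])).1).length =
      (List.range n).countP (pvIsDiv data) := by
  induction n with
  | zero =>
    cases T with
    | zero => simp [pvPad]
    | succ t => simp [pvPad, List.replicate_succ]
  | succ n ih =>
    obtain ⟨ihA, ihB⟩ := ih (fun i hi => H i (Nat.lt_succ_of_lt hi))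
    rw [List.range_succ, List.foldl_append, List.foldl_append, List.countP_append, ihA]
    set B := (List.range n).foldl (fun st i => pvStepV st (pvVert data i)) ([], []) with hB
    obtain ⟨fin, cur⟩ := B
    simp only at ihB
    by_cases hdiv : pvIsDiv data n = true
    · have hdiv' : (pvVert data n).all (fun c => c == ' ') = true := hdiv
      simp only [List.foldl_cons, List.foldl_nil, pvStepA, pvStepV, hdiv, hdiv', if_pos]
      constructor
      · simp only [pvPad_snoc_nil]
        simp [hdiv]
      · simp [hdiv, ihB]
    · have hdiv' : ¬ (pvVert data n).all (fun c => c == ' ') = true := hdiv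
      have hlt : (List.range n).countP (pvIsDiv data) < T := by
        rcases H n (Nat.lt_succ_self n) with h | h
        · exact absurd h hdiv
        · exact h
      have hfin : fin.length < T := by rw [ihB]; exact hlt
      simp only [List.foldl_cons, List.foldl_nil, pvStepA, pvStepV, hdiv, hdiv', if_neg,
        Bool.false_eq_true, not_false_iff]
      rw [pvPad_of_lt T fin cur hfin]
      constructor
      · simp only [List.countP_cons, hdiv]
        rw [← ihB, pvGetD_append, pvSet_append, pvPad_of_lt T fin _ hfin]
        simp
      · simp [hdiv, ihB]

-- B's divider test `v.strip(" ") == ""` is exactly `all characters are spaces`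
theorem pvStrip_empty (v : List Char) :
    PySem.Chars.stripChars v [' '] = [] ↔ v.all (fun c => c == ' ') = true := by
  simp only [PySem.Chars.stripChars, List.reverse_eq_nil_iff, List.dropWhile_eq_nil_iff,
    List.mem_reverse, List.all_eq_true]
  constructor
  · intro h x hx
    rw [← List.takeWhile_append_dropWhile (p := fun c => List.contains [' '] c) (l := v)] at hx
    rcases List.mem_append.mp hx with h1 | h1
    · have := List.mem_takeWhile_imp h1
      simpa using this
    · simpa using h x h1
  · intro h x hx
    have := h x (List.dropWhile_subset _ hx)
    simpa using this

-- the recursive splitter always returns at least one group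
theorem pvSplit_ne_nil (vs : List (List Char)) : pvSplitGroups vs ≠ [] := by
  cases vs with
  | nil => simp [pvSplitGroups]
  | cons v vs =>
    simp only [pvSplitGroups]
    split <;> simp

-- B's recursive back-to-front splitter materialises the finished/current fold
theorem pvSplit_fold (vs : List (List Char)) :
    ∀ (fin : List (List Int)) (cur : List Int),
      (vs.foldl pvStepV (fin, cur)).1 ++ [(vs.foldl pvStepV (fin, cur)).2] =
        fin ++ (cur ++ (pvSplitGroups vs).headD []) :: (pvSplitGroups vs).tail := by
  induction vs with
  | nil => intro fin cur; simp [pvSplitGroups]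
  | cons v vs ih =>
    intro fin cur
    obtain ⟨h, t, hht⟩ : ∃ h t, pvSplitGroups vs = h :: t := by
      cases hs : pvSplitGroups vs with
      | nil => exact absurd hs (pvSplit_ne_nil vs)
      | cons h t => exact ⟨h, t, rfl⟩
    by_cases hdiv : v.all (fun c => c == ' ') = true
    · have hs : PySem.Chars.stripChars v [' '] = [] := (pvStrip_empty v).mpr hdiv
      simp only [List.foldl_cons, pvStepV, hdiv, if_pos]
      rw [ih (fin ++ [cur]) []]
      simp [pvSplitGroups, hs, hht]
    · have hs : ¬ PySem.Chars.stripChars v [' '] = [] := fun hh => hdiv ((pvStrip_empty v).mp hh)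
      simp only [List.foldl_cons, pvStepV, hdiv, if_neg, Bool.false_eq_true, not_false_iff]
      rw [ih fin (cur ++ [pvNum v])]
      simp [pvSplitGroups, hs, hht, PySem.List.slice_from_one, pvNum]

-- ===== VERDICT (by name: the statement is the Claim_ definition above) =====
theorem parse_columns_v2_py_spec : Claim_equal_parse_columns_v2_py := by
  intro raw_input _hdom hpre
  unfold Spec_parse_columns_v2_py
  obtain ⟨hne, _hlen, hbucket, hops1, hops2⟩ := hpre
  obtain _ | ⟨line0, rest⟩ := raw_input
  · exact absurd rfl hne
  simp only [List.headD_cons] at hbucket hops1 hops2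
  unfold parse_columns_v2_py parse_columns_v2_py_alt
  simp only [PySem.List.pyGet?_zero_cons, Option.getD_some, PySem.List.slice_to_neg_one,
    PySem.List.pyGet?_neg_one]
  set data := (line0 :: rest).dropLast with hdata
  set T := (PySem.Str.split₀ line0).length with hT
  set w := line0.toList.length with hw
  set ops := PySem.Str.split₀ ((line0 :: rest).getLast?.getD "") with hops
  -- A's loop body is pvStepA
  have hA : (fun (st : List (List Int) × Nat) (i : Nat) =>
      if data.all (fun line => ((PySem.Str.pyGet? line (i : Int)).getD ' ') == ' ') then
        (st.1, st.2 + 1)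
      else
        (st.1.set st.2 ((st.1.getD st.2 []) ++
          [(PySem.Int.ofChars? (data.map (fun line => (PySem.Str.pyGet? line (i : Int)).getD ' '))).getD 0]),
         st.2)) = pvStepA data := by
    funext st i
    simp [pvStepA, pvIsDiv, pvVert, pvNum, List.all_map, Function.comp]
  -- B's verticals are pvVert
  have hV : (List.range w).map
      (fun (i : Nat) => data.map (fun line => (PySem.Str.pyGet? line (i : Int)).getD ' ')) =
      (List.range w).map (pvVert data) := by
    apply List.map_congr_left
    intro i _
    simp [pvVert]
  have hinit : (List.range T).map (fun _ => ([] : List Int)) = List.replicate T [] := by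
    simp
  rw [hA, hV, hinit]
  have H : ∀ i, i < w → pvIsDiv data i = true ∨
      (List.range i).countP (pvIsDiv data) < T := by
    intro i hi
    rcases hbucket i hi with h | h
    · exact Or.inl h
    · exact Or.inr h.2
  obtain ⟨hfoldA, hlenfin⟩ := pvInv data T w H
  rw [hfoldA]
  set B := (List.range w).foldl (fun st i => pvStepV st (pvVert data i)) ([], []) with hBdef
  -- B's recursive splitter over the verticals is the materialised fold state
  have hsplit : pvSplitGroups ((List.range w).map (pvVert data)) = B.1 ++ [B.2] := by
    have := pvSplit_fold ((List.range w).map (pvVert data)) [] []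
    rw [List.foldl_map] at this
    rw [← hBdef] at this
    obtain ⟨h, t, hht⟩ : ∃ h t, pvSplitGroups ((List.range w).map (pvVert data)) = h :: t := by
      cases hs : pvSplitGroups ((List.range w).map (pvVert data)) with
      | nil => exact absurd hs (pvSplit_ne_nil _)
      | cons h t => exact ⟨h, t, rfl⟩
    rw [hht] at this ⊢
    simpa using this.symm
  rw [hsplit]
  set groups := B.1 ++ [B.2] with hgroups
  have hd : (List.range w).countP (pvIsDiv data) + 1 = groups.length := by
    simp [hgroups, ← hlenfin]
  apply List.map_congr_left
  intro p hp
  rw [PySem.List.mem_enumerate_iff] at hp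
  obtain ⟨k, hk, rfl⟩ := hp
  have hkops : k < ops.length := hk
  have hkT : k < T := lt_of_lt_of_le hkops hops1
  have hkg : k < groups.length := by
    have h1 := hops2
    have h2 := hd
    omega
  simp only [Int.zero_add]
  rw [PySem.List.pyGet?_natCast, PySem.List.pyGet?_natCast, pvPad_getElem? T k groups hkT hkg]
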